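-- pv_equiv track=rewrite | github.com/jcole75/arc_2025_mindsai | src/modules/augmentation_framework.py | _expected_dims
-- ===== SOURCE A (Python) =====
-- def _expected_dims(method: str, sizes: list[dict]) -> tuple[int, int]:
--     n = len(sizes)
--     # Grid method: parse grid_RxC
--     if method.startswith("grid_"):
--         try:
--             shp = method.split("_", 1)[1]
--             r_str, c_str = shp.split("x")
--             R, C = int(r_str), int(c_str)
--         except Exception:
--             R, C = 1, n
--         # Row heights: max height per row; Col widths: max width per col
--         row_heights = [0] * R
--         col_widths = [0] * C
--         for idx, s in enumerate(sizes[: R * C]):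
--             rr, cc = divmod(idx, C)
--             row_heights[rr] = max(row_heights[rr], int(s.get("height", 0)))
--             col_widths[cc] = max(col_widths[cc], int(s.get("width", 0)))
--         h = sum(row_heights)
--         w = sum(col_widths)
--     elif method == "horizontal":
--         h = max(s.get("height", 0) for s in sizes)
--         w = sum(s.get("width", 0) for s in sizes)
--     elif method == "vertical":
--         h = sum(s.get("height", 0) for s in sizes)
--         w = max(s.get("width", 0) for s in sizes)
--     elif method == "color_separator_horizontal":  # stacked vertically with separator rows
--         h = sum(s.get("height", 0) for s in sizes) + (n - 1)
--         w = max(s.get("width", 0) for s in sizes)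
--     elif method == "color_separator_vertical":  # side-by-side with separator cols
--         h = max(s.get("height", 0) for s in sizes)
--         w = sum(s.get("width", 0) for s in sizes) + (n - 1)
--     else:  # fallback to horizontal
--         h = max(s.get("height", 0) for s in sizes)
--         w = sum(s.get("width", 0) for s in sizes)
--     return h, w
-- ===== SOURCE B (Python) =====
-- def _parse_rc(method, n):
--     try:
--         r_str, c_str = method.split("_", 1)[1].split("x")
--         return int(r_str), int(c_str)
--     except Exception:
--         return 1, n
--
--
-- def _expected_dims(method: str, sizes: list[dict]) -> tuple[int, int]:
--     n = len(sizes)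
--     if method.startswith("grid_"):
--         R, C = _parse_rc(method, n)
--         if R <= 0 or C <= 0:
--             return 0, 0
--         rows = [sizes[r * C:(r + 1) * C] for r in range(R)]
--         h = sum(max([s.get("height", 0) for s in row] + [0]) for row in rows)
--         w = sum(max([row[c].get("width", 0) for row in rows if c < len(row)] + [0])
--                 for c in range(C))
--         return h, w
--     hs = [s.get("height", 0) for s in sizes]
--     ws = [s.get("width", 0) for s in sizes]
--     if method == "vertical":
--         return sum(hs), max(ws)
--     if method == "color_separator_horizontal":
--         return sum(hs) + n - 1, max(ws)
--     if method == "color_separator_vertical":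
--         return max(hs), sum(ws) + n - 1
--     return max(hs), sum(ws)
-- ===== Notes on version B (the rewrite author's own statement) =====
-- stated objective: alternative
-- what changed: The grid_RxC branch is recomputed by slicing the items into per-row chunks and transposing for column widths (sum of per-slice maxima) instead of A's single enumerate/divmod fold that maintains two mutable accumulator arrays, and the four non-grid branches are flattened into one height/width projection plus a dispatch table.
-- crash fix: On grid methods naming a negative R or C whose slice sizes[:R*C] is non-empty, A raises IndexError on its empty/short accumulator arrays; B returns (0, 0), the size of an empty composite. — e.g. on _expected_dims("grid_-1x-1", [[("height", 2)]]): A raises IndexError, B returns (0, 0)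
import Mathlib
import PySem

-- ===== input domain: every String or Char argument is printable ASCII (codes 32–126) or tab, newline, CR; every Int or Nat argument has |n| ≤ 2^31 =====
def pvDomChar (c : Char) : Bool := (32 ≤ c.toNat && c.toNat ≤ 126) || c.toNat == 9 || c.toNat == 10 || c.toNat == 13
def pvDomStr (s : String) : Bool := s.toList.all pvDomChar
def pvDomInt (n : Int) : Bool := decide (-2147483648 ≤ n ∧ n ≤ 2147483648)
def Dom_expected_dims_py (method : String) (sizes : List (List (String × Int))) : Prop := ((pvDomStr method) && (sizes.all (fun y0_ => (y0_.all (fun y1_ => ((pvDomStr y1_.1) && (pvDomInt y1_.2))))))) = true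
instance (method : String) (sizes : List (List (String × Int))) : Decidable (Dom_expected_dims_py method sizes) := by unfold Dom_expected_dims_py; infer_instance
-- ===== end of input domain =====

-- B recomputes the grid branch by row slices and a column transpose instead of A's
-- index/divmod fold over two accumulator arrays, and flattens the non-grid branches
-- into one height/width projection plus a four-way table (objective: alternative).
-- Pre_ excludes exactly the inputs where the Python A raises (non-grid methods on an
-- empty list: ValueError from max(); grid methods naming a negative dimension whose
-- slice is non-empty: IndexError); on the latter B returns (0, 0), see Raises_.

-- shared ports of Python built-ins used verbatim by both sources
-- s.get(k, 0) on the item dict: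
def pyGetH (s : List (String × Int)) : Int := (PySem.Dict.mk s).getD "height" 0
def pyGetW (s : List (String × Int)) : Int := (PySem.Dict.mk s).getD "width" 0
-- max(xs) built-in (ValueError on [] is excluded by Pre_; both sources call it only there)
def pyMax (xs : List Int) : Int := (PySem.List.max? xs (fun x => x)).getD 0

-- ===== PORT A =====
-- try: shp = method.split("_",1)[1]; r_str, c_str = shp.split("x"); R, C = int(r_str), int(c_str)
-- except Exception: R, C = 1, n
def parseRC_A (method : String) (n : Int) : Int × Int :=
  match (PySem.Str.splitMax? method "_" 1).bind (fun parts => PySem.List.pyGet? parts 1) with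
  | none => (1, n)
  | some shp =>
    match PySem.Str.split? shp "x" with
    | some [r_str, c_str] =>
      match PySem.Int.ofStr? r_str, PySem.Int.ofStr? c_str with
      | some R, some C => (R, C)
      | _, _ => (1, n)
    | _ => (1, n)

-- loop body: rr, cc = divmod(idx, C); row_heights[rr] = max(row_heights[rr], s.get("height",0)); …
def gridStepA (C : Int) (acc : List Int × List Int) (p : Int × List (String × Int)) :
    List Int × List Int :=
  match PySem.Int.divmod? p.1 C with
  | none => acc  -- unreachable: the slice is non-empty only when C ≠ 0
  | some (rr, cc) =>
      (PySem.List.pySetD acc.1 rr (max (PySem.List.pyGetD acc.1 rr 0) (pyGetH p.2)),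
       PySem.List.pySetD acc.2 cc (max (PySem.List.pyGetD acc.2 cc 0) (pyGetW p.2)))

def expected_dims_py (method : String) (sizes : List (List (String × Int))) : Int × Int :=
  let n : Int := sizes.length
  if PySem.Str.startswith method "grid_" then
    let RC := parseRC_A method n
    let R := RC.1
    let C := RC.2
    let row_heights : List Int := List.replicate R.toNat 0
    let col_widths : List Int := List.replicate C.toNat 0
    let final := (PySem.List.enumerate (PySem.List.slice sizes none (some (R * C)))).foldl
        (gridStepA C) (row_heights, col_widths)
    (final.1.sum, final.2.sum)
  else if method = "horizontal" then
    (pyMax (sizes.map pyGetH), (sizes.map pyGetW).sum)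
  else if method = "vertical" then
    ((sizes.map pyGetH).sum, pyMax (sizes.map pyGetW))
  else if method = "color_separator_horizontal" then
    ((sizes.map pyGetH).sum + (n - 1), pyMax (sizes.map pyGetW))
  else if method = "color_separator_vertical" then
    (pyMax (sizes.map pyGetH), (sizes.map pyGetW).sum + (n - 1))
  else
    (pyMax (sizes.map pyGetH), (sizes.map pyGetW).sum)

-- ===== PORT B =====
def parseRC_B (method : String) (n : Int) : Int × Int :=
  match (PySem.Str.splitMax? method "_" 1).bind (fun parts => PySem.List.pyGet? parts 1) with
  | none => (1, n)
  | some shp =>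
    match PySem.Str.split? shp "x" with
    | some [r_str, c_str] =>
      match PySem.Int.ofStr? r_str, PySem.Int.ofStr? c_str with
      | some R, some C => (R, C)
      | _, _ => (1, n)
    | _ => (1, n)

def expected_dims_py_alt (method : String) (sizes : List (List (String × Int))) : Int × Int :=
  let n : Int := sizes.length
  if PySem.Str.startswith method "grid_" then
    let RC := parseRC_B method n
    let R := RC.1
    let C := RC.2
    if R ≤ 0 ∨ C ≤ 0 then (0, 0)
    else
      let rows := (PySem.List.pyRange 0 R 1).map
        (fun r => PySem.List.slice sizes (some (r * C)) (some ((r + 1) * C)))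
      let h := (rows.map (fun row => pyMax (row.map pyGetH ++ [0]))).sum
      let w := ((PySem.List.pyRange 0 C 1).map (fun c =>
          pyMax (((rows.filter (fun row => decide (c < (row.length : Int)))).map
            (fun row => pyGetW (PySem.List.pyGetD row c []))) ++ [0]))).sum
      (h, w)
  else
    let hs := sizes.map pyGetH
    let ws := sizes.map pyGetW
    if method = "vertical" then (hs.sum, pyMax ws)
    else if method = "color_separator_horizontal" then (hs.sum + (n - 1), pyMax ws)
    else if method = "color_separator_vertical" then (pyMax hs, ws.sum + (n - 1))
    else (pyMax hs, ws.sum)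

-- ===== PRECONDITION & SPEC =====
-- standalone copy of the grid_RxC parse for the precondition (independent of the ports)
def pvPreParseRC (method : String) (n : Int) : Int × Int :=
  match (PySem.Str.splitMax? method "_" 1).bind (fun parts => PySem.List.pyGet? parts 1) with
  | none => (1, n)
  | some shp =>
    match PySem.Str.split? shp "x" with
    | some [r_str, c_str] =>
      match PySem.Int.ofStr? r_str, PySem.Int.ofStr? c_str with
      | some R, some C => (R, C)
      | _, _ => (1, n)
    | _ => (1, n)

-- length of the Python slice sizes[:R*C] as a closed formula
def pvSliceLen (L P : Int) : Int := if 0 ≤ P then min P L else max 0 (L + P)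

-- A raises exactly here: non-grid methods with an empty list (ValueError from max()),
-- and grid methods naming a negative R or C whose slice sizes[:R*C] is non-empty
-- (IndexError on the empty/short accumulator arrays); Pre_ excludes only these.
def Pre_expected_dims_py (method : String) (sizes : List (List (String × Int))) : Prop :=
  if PySem.Str.startswith method "grid_" then
    let RC := pvPreParseRC method (sizes.length : Int)
    ¬ ((RC.1 < 0 ∨ RC.2 < 0) ∧ 0 < pvSliceLen (sizes.length : Int) (RC.1 * RC.2))
  else sizes ≠ []
instance (method : String) (sizes : List (List (String × Int))) : Decidable (Pre_expected_dims_py method sizes) := by unfold Pre_expected_dims_py; infer_instance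

def pvWitness_expected_dims_py : String × (List (List (String × Int))) :=
  ("grid_2x2", [[("height", 3), ("width", 2)], [("height", 1), ("width", 5)], [("width", 4)]])

-- On grid methods naming a negative dimension with a non-empty slice, A raises IndexError;
-- B returns (0, 0), the size of an empty composite, which a caller can actually use.
def Raises_expected_dims_py (method : String) (sizes : List (List (String × Int))) : Prop :=
  PySem.Str.startswith method "grid_" = true ∧
    ((pvPreParseRC method (sizes.length : Int)).1 < 0 ∨
      (pvPreParseRC method (sizes.length : Int)).2 < 0) ∧
    0 < pvSliceLen (sizes.length : Int)
        ((pvPreParseRC method (sizes.length : Int)).1 * (pvPreParseRC method (sizes.length : Int)).2)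
instance (method : String) (sizes : List (List (String × Int))) : Decidable (Raises_expected_dims_py method sizes) := by unfold Raises_expected_dims_py; infer_instance

def pvRaiseWitness_expected_dims_py : String × (List (List (String × Int))) :=
  ("grid_-1x-1", [[("height", 2)]])
def pvRaiseWitnessOut_expected_dims_py : Int × Int := (0, 0)

def Spec_expected_dims_py (method : String) (sizes : List (List (String × Int))) (out : Int × Int) : Prop := out = expected_dims_py_alt method sizes
instance (method : String) (sizes : List (List (String × Int))) (out : Int × Int) : Decidable (Spec_expected_dims_py method sizes out) := by unfold Spec_expected_dims_py; infer_instance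

-- ===== CLAIM (what is proved, stated in full; the proofs are below) =====
def Claim_equal_expected_dims_py : Prop := ∀ (method : String) (sizes : List (List (String × Int))), Dom_expected_dims_py method sizes → Pre_expected_dims_py method sizes → Spec_expected_dims_py method sizes (expected_dims_py method sizes)

def Claim_raises_expected_dims_py : Prop := (∀ (method : String) (sizes : List (List (String × Int))), Dom_expected_dims_py method sizes → Raises_expected_dims_py method sizes → ¬ Pre_expected_dims_py method sizes) ∧ (Dom_expected_dims_py (pvRaiseWitness_expected_dims_py.1) (pvRaiseWitness_expected_dims_py.2) ∧ Raises_expected_dims_py (pvRaiseWitness_expected_dims_py.1) (pvRaiseWitness_expected_dims_py.2) ∧ expected_dims_py_alt (pvRaiseWitness_expected_dims_py.1) (pvRaiseWitness_expected_dims_py.2) = pvRaiseWitnessOut_expected_dims_py)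


-- ===== LEMMAS AND PROOFS =====

-- max(xs + [0]) is the running max from 0
theorem pyMax_append_zero (xs : List Int) : pyMax (xs ++ [0]) = xs.foldl max 0 := by
  cases xs with
  | nil => simp only [List.nil_append]; decide
  | cons x t =>
      simp only [pyMax, List.cons_append, PySem.List.max?_id_cons, Option.getD_some,
        List.foldl_append, List.foldl_cons, List.foldl_nil]
      rw [List.foldl_assoc]
      exact max_comm _ _

-- divmod(k, C) for a Nat index and positive Nat divisor is Nat div/mod
theorem divmod?_natCast (k Cn : Nat) (h : 0 < Cn) :
    PySem.Int.divmod? (k : Int) (Cn : Int) =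
      some (((k / Cn : Nat) : Int), ((k % Cn : Nat) : Int)) := by
  have hb : ¬ ((Cn : Int)) = 0 := by omega
  simp only [PySem.Int.divmod?, if_neg hb, Int.fdiv_eq_ediv, Int.fmod_eq_emod,
    Option.some.injEq, Prod.mk.injEq]
  omega

theorem getD_set_of_lt (l : List Int) (i j : Nat) (a : Int) (hi : i < l.length) :
    (l.set i a).getD j 0 = if i = j then a else l.getD j 0 := by
  by_cases hj : j < l.length
  · rw [List.getD_eq_getElem _ _ (by simpa using hj), List.getElem_set]
    split <;> [rfl; exact (List.getD_eq_getElem _ _ hj).symm]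
  · rw [List.getD_eq_default _ _ (by simpa using hj), if_neg (by omega),
      List.getD_eq_default _ _ (by omega)]

-- heights of the elements of xs (enumerated from k) that fall in row r
def rowH (Cn r : Nat) : List (List (String × Int)) → Nat → List Int
  | [], _ => []
  | s :: t, k => if k / Cn = r then pyGetH s :: rowH Cn r t (k + 1) else rowH Cn r t (k + 1)

-- widths of the elements of xs (enumerated from k) that fall in column c
def colW (Cn c : Nat) : List (List (String × Int)) → Nat → List Int
  | [], _ => []
  | s :: t, k => if k % Cn = c then pyGetW s :: colW Cn c t (k + 1) else colW Cn c t (k + 1)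

-- the A-side fold, characterised per row / per column
theorem foldA_spec (Rn Cn : Nat) (hC : 0 < Cn) (xs : List (List (String × Int))) :
    ∀ (k : Nat) (rh cw : List Int), rh.length = Rn → cw.length = Cn →
      k + xs.length ≤ Rn * Cn →
      (((PySem.List.enumerate xs (k : Int)).foldl (gridStepA (Cn : Int)) (rh, cw)).1.length = Rn ∧
       ((PySem.List.enumerate xs (k : Int)).foldl (gridStepA (Cn : Int)) (rh, cw)).2.length = Cn) ∧
      (∀ r, r < Rn →
        ((PySem.List.enumerate xs (k : Int)).foldl (gridStepA (Cn : Int)) (rh, cw)).1.getD r 0 =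
          (rowH Cn r xs k).foldl max (rh.getD r 0)) ∧
      (∀ c, c < Cn →
        ((PySem.List.enumerate xs (k : Int)).foldl (gridStepA (Cn : Int)) (rh, cw)).2.getD c 0 =
          (colW Cn c xs k).foldl max (cw.getD c 0)) := by
  induction xs with
  | nil => intro k rh cw h1 h2 _; simp [PySem.List.enumerate_nil, rowH, colW, h1, h2]
  | cons s t ih =>
      intro k rh cw h1 h2 hle
      have hdiv : k / Cn < Rn := by
        have hk : k < Cn * Rn := by
          have := Nat.mul_comm Rn Cn
          simp at hle; omega
        exact Nat.div_lt_of_lt_mul hk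
      have hmod : k % Cn < Cn := Nat.mod_lt _ hC
      have hstep : gridStepA (Cn : Int) (rh, cw) ((k : Int), s) =
          (rh.set (k / Cn) (max (rh.getD (k / Cn) 0) (pyGetH s)),
           cw.set (k % Cn) (max (cw.getD (k % Cn) 0) (pyGetW s))) := by
        simp only [gridStepA, divmod?_natCast k Cn hC, PySem.List.pySetD_natCast,
          PySem.List.pyGetD_natCast]
      have hcast : (k : Int) + 1 = ((k + 1 : Nat) : Int) := by push_cast; ring
      simp only [PySem.List.enumerate_cons, List.foldl_cons, hstep, hcast]
      obtain ⟨⟨l1, l2⟩, hrow, hcol⟩ := ih (k + 1)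
        (rh.set (k / Cn) (max (rh.getD (k / Cn) 0) (pyGetH s)))
        (cw.set (k % Cn) (max (cw.getD (k % Cn) 0) (pyGetW s)))
        (by simp [h1]) (by simp [h2]) (by simp at hle ⊢; omega)
      refine ⟨⟨l1, l2⟩, ?_, ?_⟩
      · intro r hr
        rw [hrow r hr, getD_set_of_lt _ _ _ _ (by omega)]
        by_cases hkr : k / Cn = r
        · simp [rowH, hkr]
        · simp [rowH, hkr]
      · intro c hc
        rw [hcol c hc, getD_set_of_lt _ _ _ _ (by omega)]
        by_cases hkc : k % Cn = c
        · simp [colW, hkc]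
        · simp [colW, hkc]

-- rowH is the mapped contiguous block of xs
theorem rowH_eq (Cn : Nat) (hC : 0 < Cn) (r : Nat) (xs : List (List (String × Int))) :
    ∀ k : Nat, rowH Cn r xs k =
      ((xs.take (r * Cn + Cn - k)).drop (r * Cn - k)).map pyGetH := by
  induction xs with
  | nil => intro k; simp [rowH]
  | cons s t ih =>
      intro k
      by_cases h1 : k < r * Cn
      · have hne : k / Cn ≠ r := by
          have : k / Cn < r := (Nat.div_lt_iff_lt_mul hC).mpr (by omega)
          omega
        rw [show r * Cn + Cn - k = (r * Cn + Cn - (k + 1)) + 1 by omega]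
        rw [show r * Cn - k = (r * Cn - (k + 1)) + 1 by omega]
        simp only [rowH, if_neg hne, List.take_succ_cons, List.drop_succ_cons]
        exact ih (k + 1)
      · by_cases h2 : k < r * Cn + Cn
        · have heq : k / Cn = r := by
            have h3 : k / Cn < r + 1 := (Nat.div_lt_iff_lt_mul hC).mpr (by nlinarith)
            have h4 : r ≤ k / Cn := (Nat.le_div_iff_mul_le hC).mpr (by omega)
            omega
          rw [show r * Cn + Cn - k = (r * Cn + Cn - (k + 1)) + 1 by omega]
          rw [show r * Cn - k = 0 by omega]
          simp only [rowH, if_pos heq, List.take_succ_cons, List.drop_zero, List.map_cons]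
          rw [ih (k + 1), show r * Cn - (k + 1) = 0 by omega, List.drop_zero]
        · have hne : k / Cn ≠ r := by
            have : r + 1 ≤ k / Cn := (Nat.le_div_iff_mul_le hC).mpr (by nlinarith)
            omega
          have e1 : r * Cn + Cn - k = 0 := by omega
          have e2 : r * Cn + Cn - (k + 1) = 0 := by omega
          simp only [rowH, if_neg hne, e1, List.take_zero, List.drop_nil, List.map_nil,
            ih (k + 1), e2]

theorem colW_shift (Cn c : Nat) (xs : List (List (String × Int))) :
    ∀ k : Nat, colW Cn c xs (k + Cn) = colW Cn c xs k := by
  induction xs with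
  | nil => intro k; simp [colW]
  | cons s t ih =>
      intro k
      simp only [colW, Nat.add_mod_right]
      rw [show k + Cn + 1 = (k + 1) + Cn by omega, ih (k + 1)]

theorem colW_chunk (Cn c : Nat) (_hC : 0 < Cn) (hc : c < Cn)
    (xs : List (List (String × Int))) :
    ∀ k : Nat, k < Cn → colW Cn c xs k =
      (if k ≤ c then ((xs[(c - k)]?).map pyGetW).toList else []) ++
        colW Cn c (xs.drop (Cn - k)) 0 := by
  induction xs with
  | nil => intro k _; simp [colW]
  | cons s t ih =>
      intro k hk
      have hkk : k % Cn = k := Nat.mod_eq_of_lt hk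
      have htail : colW Cn c t (k + 1) =
          (if k + 1 ≤ c then ((t[(c - (k + 1))]?).map pyGetW).toList else []) ++
            colW Cn c (t.drop (Cn - (k + 1))) 0 := by
        by_cases hk1 : k + 1 < Cn
        · exact ih (k + 1) hk1
        · rw [if_neg (by omega), show Cn - (k + 1) = 0 by omega, List.drop_zero,
            List.nil_append, show k + 1 = 0 + Cn by omega, colW_shift]
      by_cases hkc : k = c
      · subst hkc
        simp only [colW, hkk, htail, if_neg (by omega : ¬ k + 1 ≤ k)]
        rw [show k - k = 0 by omega, show Cn - k = (Cn - (k + 1)) + 1 by omega]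
        simp
      · by_cases hlt : k < c
        · simp only [colW, hkk, if_neg hkc, htail, if_pos (by omega : k + 1 ≤ c),
            if_pos (by omega : k ≤ c)]
          rw [show c - k = (c - (k + 1)) + 1 by omega, show Cn - k = (Cn - (k + 1)) + 1 by omega]
          simp
        · simp only [colW, hkk, if_neg hkc, htail, if_neg (by omega : ¬ k + 1 ≤ c),
            if_neg (by omega : ¬ k ≤ c)]
          rw [show Cn - k = (Cn - (k + 1)) + 1 by omega]
          simp

-- colW over the whole list is the per-row pick of the c-th element
theorem colW_chunks (Cn c : Nat) (hC : 0 < Cn) (hc : c < Cn) :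
    ∀ (Rn : Nat) (xs : List (List (String × Int))), xs.length ≤ Rn * Cn →
      colW Cn c xs 0 =
        (List.range Rn).filterMap (fun r => (((xs.drop (r * Cn)).take Cn)[c]?).map pyGetW) := by
  intro Rn
  induction Rn with
  | zero =>
      intro xs hlen
      have hx : xs = [] := List.eq_nil_of_length_eq_zero (by omega)
      subst hx; simp [colW]
  | succ Rn ih =>
      intro xs hlen
      rw [colW_chunk Cn c hC hc xs 0 hC, if_pos (by omega), Nat.sub_zero, Nat.sub_zero]
      rw [List.range_succ_eq_map, List.filterMap_cons, List.filterMap_map]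
      have hhead : ((xs.drop (0 * Cn)).take Cn)[c]? = xs[c]? := by
        simp [hc]
      rw [hhead]
      have htail : (List.filterMap ((fun r => (((xs.drop (r * Cn)).take Cn)[c]?).map pyGetW) ∘
          (fun n => n + 1)) (List.range Rn)) =
          List.filterMap (fun r => ((((xs.drop Cn).drop (r * Cn)).take Cn)[c]?).map pyGetW)
            (List.range Rn) := by
        apply List.filterMap_congr
        intro r _
        simp only [Function.comp]
        rw [List.drop_drop, show (r + 1) * Cn = Cn + r * Cn by ring]
      rw [htail, ← ih (xs.drop Cn) (by simp; nlinarith [hlen])]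
      cases xs[c]? <;> simp

-- picking the c-th element of each row: filterMap = filter + getD
theorem filterMap_pick (c : Nat) (F : Nat → List (List (String × Int))) (l : List Nat) :
    l.filterMap (fun r => ((F r)[c]?).map pyGetW) =
      (l.filter (fun r => decide (c < (F r).length))).map
        (fun r => pyGetW ((F r).getD c [])) := by
  induction l with
  | nil => rfl
  | cons r t ih =>
      rw [List.filterMap_cons, List.filter_cons]
      by_cases h : c < (F r).length
      · rw [List.getElem?_eq_getElem h]
        simp only [Option.map_some, h, decide_true, if_true, List.map_cons]
        rw [ih, List.getD_eq_getElem _ _ h]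
      · rw [List.getElem?_eq_none (by omega : (F r).length ≤ c)]
        simp only [Option.map_none, h, decide_false, Bool.false_eq_true, if_false]
        exact ih

-- an empty Python slice sizes[:P]
theorem slice_to_nil (xs : List (List (String × Int))) (P : Int)
    (h : pvSliceLen (xs.length : Int) P ≤ 0) :
    PySem.List.slice xs none (some P) = [] := by
  unfold pvSliceLen at h
  split at h
  · rw [PySem.List.slice_to xs (by omega)]
    have : P.toNat = 0 ∨ xs.length = 0 := by omega
    rcases this with h0 | h0
    · simp [h0]
    · rw [List.length_eq_zero_iff.mp h0]; simp
  · have hk : 0 < (-P).toNat := by omega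
    have hP : P = -(((-P).toNat : Nat) : Int) := by omega
    rw [hP, PySem.List.slice_to_neg_natCast xs _ hk,
      show xs.length - (-P).toNat = 0 by omega]
    simp

-- a chunk of the truncated list is the chunk of the full list
theorem chunk_take (sizes : List (List (String × Int))) (Rn Cn r : Nat) (hr : r < Rn) :
    ((sizes.take (Rn * Cn)).drop (r * Cn)).take Cn = (sizes.drop (r * Cn)).take Cn := by
  have h3 : Cn + r * Cn ≤ Rn * Cn := by nlinarith
  rw [List.drop_take, List.take_take, Nat.min_eq_left (Nat.le_sub_of_add_le h3)]

-- B's row list, in Nat form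
theorem rowsB_eq (sizes : List (List (String × Int))) (Rn Cn : Nat) :
    (PySem.List.pyRange 0 ((Rn : Int)) 1).map
        (fun r => PySem.List.slice sizes (some (r * (Cn : Int))) (some ((r + 1) * (Cn : Int)))) =
      (List.range Rn).map (fun r => (sizes.drop (r * Cn)).take Cn) := by
  rw [PySem.List.pyRange_one, List.map_map]
  simp only [Int.sub_zero, Int.toNat_natCast]
  apply List.map_congr_left
  intro k _
  simp only [Function.comp]
  rw [show ((0 : Int) + k) * (Cn : Int) = ((k * Cn : Nat) : Int) by push_cast; ring,
    show ((0 : Int) + k + 1) * (Cn : Int) = ((k * Cn + Cn : Nat) : Int) by push_cast; ring,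
    PySem.List.slice_natCast, Nat.add_sub_cancel_left]

-- the grid branch with positive parsed dimensions: A's fold equals B's slices/transpose
theorem grid_pos_eq (sizes : List (List (String × Int))) (R C : Int)
    (hR : 0 < R) (hC : 0 < C) :
    (((PySem.List.enumerate (PySem.List.slice sizes none (some (R * C)))).foldl (gridStepA C)
        (List.replicate R.toNat 0, List.replicate C.toNat 0)).1.sum,
     ((PySem.List.enumerate (PySem.List.slice sizes none (some (R * C)))).foldl (gridStepA C)
        (List.replicate R.toNat 0, List.replicate C.toNat 0)).2.sum) =
    (let rows := (PySem.List.pyRange 0 R 1).map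
        (fun r => PySem.List.slice sizes (some (r * C)) (some ((r + 1) * C)))
     (((rows.map (fun row => pyMax (row.map pyGetH ++ [0]))).sum,
      ((PySem.List.pyRange 0 C 1).map (fun c =>
          pyMax (((rows.filter (fun row => decide (c < (row.length : Int)))).map
            (fun row => pyGetW (PySem.List.pyGetD row c []))) ++ [0]))).sum) : Int × Int)) := by
  obtain ⟨Rn, hRn⟩ : ∃ n : Nat, R = (n : Int) := ⟨R.toNat, (Int.toNat_of_nonneg (by omega)).symm⟩
  obtain ⟨Cn, hCn⟩ : ∃ n : Nat, C = (n : Int) := ⟨C.toNat, (Int.toNat_of_nonneg (by omega)).symm⟩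
  subst hRn hCn
  have hRn0 : 0 < Rn := by omega
  have hCn0 : 0 < Cn := by omega
  have hslice : PySem.List.slice sizes none (some ((Rn : Int) * (Cn : Int))) =
      sizes.take (Rn * Cn) := by
    rw [show ((Rn : Int)) * (Cn : Int) = ((Rn * Cn : Nat) : Int) by push_cast; ring,
      PySem.List.slice_to_natCast]
  set xs := sizes.take (Rn * Cn) with hxs
  have hlen : xs.length ≤ Rn * Cn := by simp [hxs]
  obtain ⟨⟨l1, l2⟩, hrow, hcol⟩ := foldA_spec Rn Cn hCn0 xs 0
    (List.replicate Rn 0) (List.replicate Cn 0) (by simp) (by simp) (by omega)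
  simp only [Nat.cast_zero] at l1 l2 hrow hcol
  rw [hslice, Int.toNat_natCast, Int.toNat_natCast]
  rw [rowsB_eq sizes Rn Cn]
  -- rows as chunks of the truncated list
  have hchunk : ∀ r, r < Rn → (sizes.drop (r * Cn)).take Cn = (xs.drop (r * Cn)).take Cn := by
    intro r hr
    rw [hxs, chunk_take sizes Rn Cn r hr]
  -- first component
  have hfst : ((PySem.List.enumerate xs (0 : Int)).foldl (gridStepA (Cn : Int))
      (List.replicate Rn 0, List.replicate Cn 0)).1 =
      (List.range Rn).map (fun r => (rowH Cn r xs 0).foldl max 0) := by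
    apply List.ext_getElem (by simp [l1])
    intro i h1 h2
    rw [List.getElem_map, List.getElem_range]
    have hi : i < Rn := by simpa using h2
    rw [← List.getD_eq_getElem _ 0 h1, hrow i hi]
    congr 1
    simp [List.getD, hi]
  have hmaps : ∀ r ∈ List.range Rn,
      pyMax (((sizes.drop (r * Cn)).take Cn).map pyGetH ++ [0]) =
        (rowH Cn r xs 0).foldl max 0 := by
    intro r hr
    have hrlt : r < Rn := List.mem_range.mp hr
    rw [pyMax_append_zero, rowH_eq Cn hCn0 r xs 0, Nat.sub_zero, Nat.sub_zero,
      List.drop_take, Nat.add_sub_cancel_left, hchunk r hrlt]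
  -- second component
  have hsnd : ((PySem.List.enumerate xs (0 : Int)).foldl (gridStepA (Cn : Int))
      (List.replicate Rn 0, List.replicate Cn 0)).2 =
      (List.range Cn).map (fun c => (colW Cn c xs 0).foldl max 0) := by
    apply List.ext_getElem (by simp [l2])
    intro i h1 h2
    rw [List.getElem_map, List.getElem_range]
    have hi : i < Cn := by simpa using h2
    rw [← List.getD_eq_getElem _ 0 h1, hcol i hi]
    congr 1
    simp [List.getD, hi]
  have hcols : ∀ c ∈ List.range Cn,
      pyMax (((((List.range Rn).map (fun r => (sizes.drop (r * Cn)).take Cn)).filter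
          (fun row => decide (((c : Nat) : Int) < (row.length : Int)))).map
          (fun row => pyGetW (PySem.List.pyGetD row ((c : Nat) : Int) []))) ++ [0]) =
        (colW Cn c xs 0).foldl max 0 := by
    intro c hcm
    have hclt : c < Cn := List.mem_range.mp hcm
    rw [colW_chunks Cn c hCn0 hclt Rn xs hlen, filterMap_pick c (fun r => (xs.drop (r * Cn)).take Cn)]
    rw [pyMax_append_zero]
    congr 1
    rw [List.filter_map, List.map_map]
    have hfilter : ((List.range Rn).filter
        ((fun row => decide (((c : Nat) : Int) < (row.length : Int))) ∘
          (fun r => (sizes.drop (r * Cn)).take Cn))) =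
        ((List.range Rn).filter (fun r => decide (c < ((xs.drop (r * Cn)).take Cn).length))) := by
      apply List.filter_congr
      intro r hrm
      have hrlt : r < Rn := List.mem_range.mp hrm
      simp only [Function.comp, hchunk r hrlt]
      simp [Nat.cast_lt]
    rw [hfilter]
    apply List.map_congr_left
    intro r hrm
    have hr2 : r < Rn := List.mem_range.mp (List.mem_filter.mp hrm).1
    simp only [Function.comp, hchunk r hr2, PySem.List.pyGetD_natCast]
  -- assemble
  simp only []
  rw [hfst, hsnd]
  congr 1
  · rw [List.map_map]
    refine congrArg List.sum ?_
    apply List.map_congr_left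
    intro r hr
    simp only [Function.comp]
    exact (hmaps r hr).symm
  · rw [PySem.List.pyRange_one, List.map_map]
    simp only [Int.sub_zero, Int.toNat_natCast]
    refine congrArg List.sum ?_
    apply List.map_congr_left
    intro c hc
    simp only [Function.comp, Int.zero_add]
    exact (hcols c hc).symm

-- ===== VERDICT (by name: the statement is the Claim_ definition above) =====
theorem expected_dims_py_spec : Claim_equal_expected_dims_py := by
  intro method sizes hdom hpre
  unfold Spec_expected_dims_py
  by_cases hg : PySem.Str.startswith method "grid_" = true
  · unfold Pre_expected_dims_py at hpre
    rw [show pvPreParseRC = parseRC_A from rfl] at hpre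
    unfold expected_dims_py expected_dims_py_alt
    rw [show parseRC_B = parseRC_A from rfl]
    simp only [hg, if_true] at hpre ⊢
    generalize hRC : parseRC_A method ((sizes.length : Nat) : Int) = RC at hpre ⊢
    obtain ⟨R, C⟩ := RC
    by_cases hdeg : R ≤ 0 ∨ C ≤ 0
    · rw [if_pos hdeg]
      have hsl : pvSliceLen (sizes.length : Int) (R * C) ≤ 0 := by
        by_cases h0 : R < 0 ∨ C < 0
        · exact Int.not_lt.mp (fun hlt => hpre ⟨h0, hlt⟩)
        · push Not at h0
          have hRC0 : R * C = 0 := by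
            rcases hdeg with h | h
            · rw [show R = 0 by omega, zero_mul]
            · rw [show C = 0 by omega, mul_zero]
          rw [hRC0]
          unfold pvSliceLen
          simp
      rw [slice_to_nil sizes _ hsl]
      simp [PySem.List.enumerate_nil, List.sum_replicate]
    · push Not at hdeg
      rw [if_neg (by push Not; exact hdeg)]
      exact grid_pos_eq sizes R C (by omega) (by omega)
  · unfold expected_dims_py expected_dims_py_alt
    simp only [hg, Bool.false_eq_true, if_false]
    split_ifs <;> simp_all

theorem expected_dims_py_raises : Claim_raises_expected_dims_py := by
  unfold Claim_raises_expected_dims_py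
  exact ⟨by
    intro method sizes _ hr
    unfold Pre_expected_dims_py
    simp only [hr.1, if_true]
    exact fun h => h ⟨hr.2.1, hr.2.2⟩, by decide⟩

-- self-check: the raise witness is indeed excluded from Pre_ (uses the theorem above)
theorem pvRaiseWitness_ok :
    ¬ Pre_expected_dims_py pvRaiseWitness_expected_dims_py.1 pvRaiseWitness_expected_dims_py.2 := by
  have h := expected_dims_py_raises
  unfold Claim_raises_expected_dims_py at h
  exact h.1 _ _ (by decide) (by decide)
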